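-- pv_equiv track=rewrite | github.com/JeromeLefebvre/ProjectEuler | Python/Problem148.py | base7
-- ===== SOURCE A (Python) =====
-- def base7(n):
-- 	base = []
-- 	while n != 0:
-- 		a = n % 7
-- 		base.append(a)
-- 		n //= 7
-- 	base.reverse()
-- 	return base
-- ===== SOURCE B (Python) =====
-- def base7(n):
-- 	if n == 0:
-- 		return []
-- 	p = 1
-- 	while p * 7 <= n:
-- 		p *= 7
-- 	digits = []
-- 	while p > 0:
-- 		digits.append(n // p)
-- 		n %= p
-- 		p //= 7
-- 	return digits
-- ===== Notes on version B (the rewrite author's own statement) =====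
-- stated objective: alternative
-- what changed: Replaces A's least-significant-first loop with append-then-reverse by a top-down extraction: first find the largest power of 7 not exceeding n, then peel digits most-significant-first by division by descending powers, so no reverse is needed.
import Mathlib
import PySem

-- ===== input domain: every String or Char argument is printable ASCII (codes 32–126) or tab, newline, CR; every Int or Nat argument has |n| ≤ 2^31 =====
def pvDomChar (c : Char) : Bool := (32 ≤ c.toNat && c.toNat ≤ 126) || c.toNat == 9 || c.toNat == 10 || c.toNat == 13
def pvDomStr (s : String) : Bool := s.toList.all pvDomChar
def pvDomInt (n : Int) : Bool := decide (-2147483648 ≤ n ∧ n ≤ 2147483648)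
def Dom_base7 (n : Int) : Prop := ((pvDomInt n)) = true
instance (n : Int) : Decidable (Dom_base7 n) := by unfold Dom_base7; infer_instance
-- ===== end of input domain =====

-- B replaces A's append-then-reverse loop by finding the largest power of 7 ≤ n and peeling digits most-significant-first (alternative algorithm, same cost).
-- Pre_ excludes n < 0, where Python A never returns (its while loop runs forever).


-- ===== PORT A =====
-- termination guard 0 < n coincides with Python's n != 0 on the admitted nonnegative inputs
def base7Loop (n : Int) (base : List Int) : List Int :=
  if _h : 0 < n then
    base7Loop (PySem.Int.floordiv n 7) (base ++ [PySem.Int.mod n 7])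
  else base
termination_by n.toNat
decreasing_by
  have : PySem.Int.floordiv n 7 = n / 7 := PySem.Int.floordiv_eq_ediv_of_pos (by omega)
  rw [this]; omega

def base7 (n : Int) : List Int := (base7Loop n []).reverse

-- ===== PORT B =====
-- first while loop of Source B; the extra '0 < p' conjunct is a pure totality guard (p starts at 1 and only grows)
def b7Pow (n p : Int) : Int :=
  if _h : 0 < p ∧ p * 7 ≤ n then b7Pow n (p * 7) else p
termination_by (n - p).toNat
decreasing_by omega

-- second while loop of Source B: append n // p, then n %= p, p //= 7
def b7Digits (n p : Int) (digits : List Int) : List Int :=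
  if _h : 0 < p then
    b7Digits (PySem.Int.mod n p) (PySem.Int.floordiv p 7) (digits ++ [PySem.Int.floordiv n p])
  else digits
termination_by p.toNat
decreasing_by
  have : PySem.Int.floordiv p 7 = p / 7 := PySem.Int.floordiv_eq_ediv_of_pos (by omega)
  rw [this]; omega

def base7_alt (n : Int) : List Int :=
  if n = 0 then [] else b7Digits n (b7Pow n 1) []

-- ===== PRECONDITION & SPEC =====
-- Pre_ excludes n < 0: there Python A's while loop never terminates (n //= 7 converges to -1, never 0), so A returns on exactly 0 ≤ n.
def Pre_base7 (n : Int) : Prop := 0 ≤ n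
instance (n : Int) : Decidable (Pre_base7 n) := by unfold Pre_base7; infer_instance
def pvWitness_base7 : Int := (10)
def Spec_base7 (n : Int) (out : List Int) : Prop := out = base7_alt n
instance (n : Int) (out : List Int) : Decidable (Spec_base7 n out) := by unfold Spec_base7; infer_instance

-- ===== CLAIM (what is proved, stated in full; the proofs are below) =====
def Claim_equal_base7 : Prop := ∀ (n : Int), Dom_base7 n → Pre_base7 n → Spec_base7 n (base7 n)

-- ===== LEMMAS AND PROOFS =====

-- canonical least-significant-first recursion, used only in the proofs
def canI (n : Int) : List Int :=
  if _h : 0 < n then canI (n / 7) ++ [n % 7] else []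
termination_by n.toNat
decreasing_by omega

-- digits of n padded to k+1 places, least-significant built last
def padI : Nat → Int → List Int
  | 0, n => [n]
  | k + 1, n => padI k (n / 7) ++ [n % 7]

theorem base7Loop_eq (n : Int) (base : List Int) :
    base7Loop n base = base ++ (canI n).reverse := by
  by_cases h : 0 < n
  · rw [base7Loop, canI, dif_pos h, dif_pos h,
      PySem.Int.floordiv_eq_ediv_of_pos (show (0:Int) < 7 by omega),
      PySem.Int.mod_eq_emod_of_pos (show (0:Int) < 7 by omega),
      base7Loop_eq (n / 7) (base ++ [n % 7])]
    simp
  · rw [base7Loop, canI, dif_neg h, dif_neg h]; simp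
termination_by n.toNat
decreasing_by omega

theorem b7Pow_spec (n p : Int) (hp : 0 < p) (hpn : p ≤ n) :
    ∃ k : Nat, b7Pow n p = p * 7 ^ k ∧ p * 7 ^ k ≤ n ∧ n < p * 7 ^ (k + 1) := by
  rw [b7Pow]
  by_cases h : p * 7 ≤ n
  · rw [dif_pos ⟨hp, h⟩]
    obtain ⟨k, hk, hle, hlt⟩ := b7Pow_spec n (p * 7) (by omega) h
    exact ⟨k + 1, by rw [hk]; ring, by rw [pow_succ]; linarith [hle], by
      calc n < p * 7 * 7 ^ (k + 1) := hlt
        _ = p * 7 ^ (k + 1 + 1) := by ring⟩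
  · rw [dif_neg (by tauto)]
    exact ⟨0, by ring, by simpa using hpn, by simpa using h⟩
termination_by (n - p).toNat
decreasing_by omega

-- (n % (7*m)) / 7 = (n / 7) % m  for 0 < m  (used to peel the head digit off a padded tail)
theorem emod_mul_ediv (n m : Int) :
    (n % (7 * m)) / 7 = (n / 7) % m := by
  have h1 : n % (7 * m) = n - 7 * m * (n / (7 * m)) := Int.emod_def n (7 * m)
  have h2 : n / (7 * m) = n / 7 / m := (Int.ediv_ediv_of_nonneg (by norm_num)).symm
  have h3 : (n - 7 * m * (n / (7 * m))) / 7 = n / 7 - m * (n / (7 * m)) := by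
    have := Int.add_mul_ediv_right (n) (-(m * (n / (7 * m)))) (show (7:Int) ≠ 0 by omega)
    calc (n - 7 * m * (n / (7 * m))) / 7 = (n + -(m * (n / (7 * m))) * 7) / 7 := by ring_nf
      _ = n / 7 + -(m * (n / (7 * m))) := this
      _ = n / 7 - m * (n / (7 * m)) := by ring
  have h4 : (n / 7) % m = n / 7 - m * (n / 7 / m) := Int.emod_def (n / 7) m
  rw [h1, h3, h4, h2]

theorem padI_head (k : Nat) (n : Int) :
    padI (k + 1) n = (n / 7 ^ (k + 1)) :: padI k (n % 7 ^ (k + 1)) := by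
  induction k generalizing n with
  | zero =>
    simp only [padI]
    have : n % 7 ^ 1 % 7 = n % 7 := Int.emod_emod_of_dvd n (by norm_num)
    have h2 : n % 7 ^ 1 / 7 = 0 := by
      have := Int.emod_nonneg n (show (7:Int)^1 ≠ 0 by norm_num)
      have := Int.emod_lt_of_pos n (show (0:Int) < 7 ^ 1 by norm_num)
      omega
    simp [pow_one]
  | succ k ih =>
    have hpow : (7:Int) ^ (k + 2) = 7 * 7 ^ (k + 1) := by ring
    have hmod : n % 7 ^ (k + 2) % 7 = n % 7 := by
      rw [hpow]; exact Int.emod_emod_of_dvd n ⟨7 ^ (k + 1), by ring⟩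
    have hdiv : n % 7 ^ (k + 2) / 7 = n / 7 % 7 ^ (k + 1) := by
      rw [hpow]; exact emod_mul_ediv n (7 ^ (k + 1))
    have hhead : n / 7 / 7 ^ (k + 1) = n / 7 ^ (k + 2) := by
      rw [Int.ediv_ediv_of_nonneg (show (0:Int) ≤ 7 by norm_num), ← hpow]
    calc padI (k + 2) n = padI (k + 1) (n / 7) ++ [n % 7] := rfl
      _ = (n / 7 / 7 ^ (k + 1)) :: (padI k (n / 7 % 7 ^ (k + 1)) ++ [n % 7]) := by rw [ih]; rfl
      _ = (n / 7 ^ (k + 2)) :: padI (k + 1) (n % 7 ^ (k + 2)) := by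
          simp only [hhead, padI, hdiv, hmod]

theorem b7Digits_eq (k : Nat) (n : Int) (hn : 0 ≤ n) (digits : List Int) :
    b7Digits n (7 ^ k) digits = digits ++ padI k n := by
  induction k generalizing n digits with
  | zero =>
    rw [b7Digits, dif_pos (by norm_num)]
    rw [b7Digits]
    have h1 : PySem.Int.floordiv ((7:Int) ^ 0) 7 = 0 := by decide
    rw [h1, dif_neg (by omega)]
    have : PySem.Int.floordiv n ((7:Int) ^ 0) = n := by
      rw [PySem.Int.floordiv_eq_ediv_of_pos (by norm_num)]; simp
    rw [this]; rfl
  | succ k ih =>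
    rw [b7Digits, dif_pos (by positivity)]
    have hp : PySem.Int.floordiv ((7:Int) ^ (k + 1)) 7 = 7 ^ k := by
      rw [PySem.Int.floordiv_eq_ediv_of_pos (by norm_num), pow_succ,
        Int.mul_ediv_cancel _ (by norm_num)]
    have hm : PySem.Int.mod n ((7:Int) ^ (k + 1)) = n % 7 ^ (k + 1) :=
      PySem.Int.mod_eq_emod_of_pos (by positivity)
    have hd : PySem.Int.floordiv n ((7:Int) ^ (k + 1)) = n / 7 ^ (k + 1) :=
      PySem.Int.floordiv_eq_ediv_of_pos (by positivity)
    rw [hp, hm, hd, ih _ (Int.emod_nonneg n (by positivity)), padI_head]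
    simp

theorem canI_eq_padI (k : Nat) (n : Int) (hlo : 7 ^ k ≤ n) (hhi : n < 7 ^ (k + 1)) :
    canI n = padI k n := by
  induction k generalizing n with
  | zero =>
    rw [canI, dif_pos (by simpa using hlo |>.trans_lt' (by norm_num))]
    have h0 : n / 7 = 0 := by
      have : (7:Int) ^ 1 = 7 := by norm_num
      omega
    have h1 : n % 7 = n := by
      have : (7:Int) ^ 1 = 7 := by norm_num
      omega
    rw [h0, canI, dif_neg (by omega), h1]
    rfl
  | succ k ih =>
    have hn : 0 < n := lt_of_lt_of_le (by positivity) hlo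
    rw [canI, dif_pos hn]
    have hlo' : 7 ^ k ≤ n / 7 := by
      rw [Int.le_ediv_iff_mul_le (by norm_num)]
      calc 7 ^ k * 7 = (7:Int) ^ (k + 1) := by ring
        _ ≤ n := hlo
    have hhi' : n / 7 < 7 ^ (k + 1) := by
      rw [Int.ediv_lt_iff_lt_mul (by norm_num)]
      calc n < 7 ^ (k + 2) := hhi
        _ = (7:Int) ^ (k + 1) * 7 := by ring
    rw [ih _ hlo' hhi']
    rfl

theorem alt_eq_canI (n : Int) (hn : 0 ≤ n) : base7_alt n = canI n := by
  unfold base7_alt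
  by_cases h0 : n = 0
  · rw [if_pos h0, h0, canI, dif_neg (by omega)]
  · rw [if_neg h0]
    obtain ⟨k, hk, hle, hlt⟩ := b7Pow_spec n 1 (by omega) (by omega)
    rw [hk]
    simp only [one_mul] at *
    rw [b7Digits_eq k n hn, canI_eq_padI k n hle hlt]
    simp

-- ===== VERDICT (by name: the statement is the Claim_ definition above) =====
theorem base7_spec : Claim_equal_base7 := by
  intro n _ hpre
  unfold Spec_base7 base7
  rw [base7Loop_eq, alt_eq_canI n hpre]
  simp
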